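-- pv_equiv track=rewrite | github.com/Zeronus/cs-archive | Mastery I 2018 Handout/2018.1-task5.py | kthWord
-- ===== SOURCE A (Python) =====
-- def kthWord(L,k):
--     answer = []
--     count = 0
--     countLimit = 1
--     while True:
--         answer.append(L[count])
--         count += 1
--         if count == countLimit:
--             countLimit += 1
--             count = 0
--         if answer[-1] == L[-1]:
--             break
--     if k == 0 or k > len(answer):
--         return None
--     return answer[k-1]
-- ===== SOURCE B (Python) =====
-- def kthWord(L, k):
--     m = L.index(L[-1])              # first position holding the last value
--     N = (m + 1) * (m + 2) // 2      # total length of the generated sequence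
--     if k == 0 or k > N:
--         return None
--     i = k - 1 if k >= 1 else N + k - 1
--     r = 0
--     while (r + 1) * (r + 2) // 2 <= i:
--         r += 1
--     return L[i - r * (r + 1) // 2]
-- ===== Notes on version B (the rewrite author's own statement) =====
-- stated objective: faster
-- what changed: B replaces A's element-by-element simulation of the triangular prefix stream (quadratic in the position m of the first occurrence of the last value) by arithmetic: it finds m with list.index, computes the stream length N=(m+1)(m+2)/2 in closed form, and maps the (negative-wrapped) index to (row,col) by inverting triangular numbers, answering with a single list access.
import Mathlib
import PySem

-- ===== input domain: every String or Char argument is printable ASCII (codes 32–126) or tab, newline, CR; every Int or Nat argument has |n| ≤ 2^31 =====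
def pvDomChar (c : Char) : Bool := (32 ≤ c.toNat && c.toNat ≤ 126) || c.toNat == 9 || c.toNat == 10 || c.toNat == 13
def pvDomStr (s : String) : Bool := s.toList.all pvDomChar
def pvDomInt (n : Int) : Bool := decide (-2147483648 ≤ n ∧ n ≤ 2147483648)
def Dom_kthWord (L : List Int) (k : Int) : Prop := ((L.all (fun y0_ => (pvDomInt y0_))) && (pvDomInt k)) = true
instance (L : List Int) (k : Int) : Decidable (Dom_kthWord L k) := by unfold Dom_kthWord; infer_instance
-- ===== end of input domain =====

-- B replaces A's simulation of the triangular prefix stream by closed-form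
-- triangular-number arithmetic and a single list access (objective: faster).

-- ===== PORT A =====
-- the while-True loop; fuel only makes it total (the loop stops within
-- (len+1)(len+2)/2 steps on every input where Python A returns)
def kthWordLoop (L : List Int) : Nat → List Int → Nat → Nat → List Int
  | 0, ans, _, _ => ans
  | fuel+1, ans, count, limit =>
    match PySem.List.pyGet? L ((count : Nat) : Int) with
    | none => ans   -- Python: IndexError (only reachable for L = [], outside Pre_)
    | some v =>
      let ans' := ans ++ [v]
      let count' := count + 1
      let p := if count' = limit then (0, limit + 1) else (count', limit)
      if PySem.List.pyGet? ans' (-1) = PySem.List.pyGet? L (-1) then ans'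
      else kthWordLoop L fuel ans' p.1 p.2

def kthWord (L : List Int) (k : Int) : Option Int :=
  let ans := kthWordLoop L ((L.length + 1) * (L.length + 2) / 2 + 1) [] 0 1
  if k = 0 ∨ (ans.length : Int) < k then none
  else PySem.List.pyGet? ans (k - 1)

-- ===== PORT B =====
-- the while-loop of Source B finding the row r: largest r with r(r+1)/2 ≤ i;
-- fuel only makes it total.  (r+1)*(r+2)//2 on nonnegative ints = Nat division.
def findRowB (i : Int) : Nat → Nat → Nat
  | 0, r => r
  | fuel+1, r => if (((r + 1) * (r + 2) / 2 : Nat) : Int) ≤ i then findRowB i fuel (r + 1) else r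

def kthWord_alt (L : List Int) (k : Int) : Option Int :=
  match PySem.List.pyGet? L (-1) with
  | none => none            -- Python: L[-1] raises IndexError (L = [], outside Pre_)
  | some t =>
    match PySem.List.index? L t with
    | none => none          -- unreachable: t = L[-1] is a member of L
    | some m =>
      let N : Int := (((m + 1) * (m + 2) / 2 : Nat) : Int)
      if k = 0 ∨ N < k then none
      else
        let i : Int := if 1 ≤ k then k - 1 else N + k - 1
        let r := findRowB i (i.toNat + 1) 0
        PySem.List.pyGet? L (i - ((r * (r + 1) / 2 : Nat) : Int))

-- ===== PRECONDITION & SPEC =====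
-- Pre_ excludes exactly the inputs where Python A raises IndexError: the empty list
-- (L[-1]/L[0] raise), and k so negative that answer[k-1] is out of range (k ≤ -N,
-- where N = (m+1)(m+2)/2 is the length of the generated sequence, m the first index
-- holding the last value of L).
def Pre_kthWord (L : List Int) (k : Int) : Prop :=
  L ≠ [] ∧
    (let m := (PySem.List.index? L ((PySem.List.pyGet? L (-1)).getD 0)).getD 0
     1 - (((m + 1) * (m + 2) / 2 : Nat) : Int) ≤ k)
instance (L : List Int) (k : Int) : Decidable (Pre_kthWord L k) := by
  unfold Pre_kthWord; infer_instance

def pvWitness_kthWord : List Int × Int := ([3, 1, 4, 1], 5)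

def Spec_kthWord (L : List Int) (k : Int) (out : Option Int) : Prop := out = kthWord_alt L k
instance (L : List Int) (k : Int) (out : Option Int) : Decidable (Spec_kthWord L k out) := by
  unfold Spec_kthWord; infer_instance

-- ===== CLAIM (what is proved, stated in full; the proofs are below) =====
def Claim_equal_kthWord : Prop :=
  ∀ (L : List Int) (k : Int), Dom_kthWord L k → Pre_kthWord L k → Spec_kthWord L k (kthWord L k)

-- ===== LEMMAS AND PROOFS =====

-- triangular numbers
def pvT : Nat → Nat
  | 0 => 0
  | r + 1 => pvT r + (r + 1)

theorem pvT_two (r : Nat) : 2 * pvT r = r * (r + 1) := by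
  induction r with
  | zero => rfl
  | succ n ih =>
    have h : (n + 1) * (n + 1 + 1) = n * (n + 1) + 2 * (n + 1) := by ring
    simp only [pvT]
    omega

theorem pvT_eq (r : Nat) : r * (r + 1) / 2 = pvT r := by
  have := pvT_two r
  omega

theorem pvT_closed (r : Nat) : (r + 1) * (r + 2) / 2 = pvT (r + 1) := by
  have h1 := pvT_two (r + 1)
  have h2 : (r + 1) * (r + 1 + 1) = (r + 1) * (r + 2) := by ring
  omega

theorem pvT_le_self (r : Nat) : r ≤ pvT r := by
  induction r with
  | zero => simp [pvT]
  | succ n ih => simp only [pvT]; omega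

theorem pvT_mono {r s : Nat} (h : r ≤ s) : pvT r ≤ pvT s := by
  induction s with
  | zero => simp_all
  | succ n ih =>
    rcases Nat.lt_or_ge r (n + 1) with h' | h'
    · have := ih (by omega)
      simp only [pvT]
      omega
    · have : r = n + 1 := by omega
      subst this
      exact le_refl _

-- the remaining output of A's loop from state (count = c, countLimit = R+1)
def pvRest (L : List Int) (m R c : Nat) : List Int :=
  (L.take (R + 1)).drop c ++ (List.range' (R + 1) (m - R)).flatMap (fun r => L.take (r + 1))

theorem pvRest_len_pos (L : List Int) (m R c : Nat) (hc : c ≤ R) (hR : R < L.length) :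
    1 ≤ (pvRest L m R c).length := by
  simp only [pvRest, List.length_append, List.length_drop, List.length_take]
  omega

theorem pvRest_cons_lt (L : List Int) (m R c : Nat) (hc : c < R) (hR : R < L.length) :
    pvRest L m R c = L[c]'(by omega) :: pvRest L m R (c + 1) := by
  unfold pvRest
  have hlen : c < (L.take (R + 1)).length := by simp [List.length_take]; omega
  rw [← List.getElem_cons_drop hlen]
  simp [List.getElem_take]

theorem pvRest_cons_eq (L : List Int) (m R : Nat) (hR : R < m) (hm : m < L.length) :
    pvRest L m R R = L[R]'(by omega) :: pvRest L m (R + 1) 0 := by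
  unfold pvRest
  have h1 : (L.take (R + 1)).drop R = [L[R]'(by omega)] := by
    apply List.ext_getElem
    · simp [List.length_drop, List.length_take]; omega
    · intro i hi1 hi2
      simp only [List.length_drop, List.length_take] at hi1
      have hi0 : i = 0 := by omega
      subst hi0
      simp [List.getElem_drop, List.getElem_take]
  have h2 : m - R = (m - (R + 1)) + 1 := by omega
  rw [h1, h2, List.range'_succ, List.flatMap_cons]
  simp

theorem pvRest_last (L : List Int) (m : Nat) (hm : m < L.length) :
    pvRest L m m m = [L[m]] := by
  unfold pvRest
  have h1 : (L.take (m + 1)).drop m = [L[m]] := by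
    apply List.ext_getElem
    · simp [List.length_drop, List.length_take]; omega
    · intro i hi1 hi2
      simp only [List.length_drop, List.length_take] at hi1
      have hi0 : i = 0 := by omega
      subst hi0
      simp [List.getElem_drop, List.getElem_take]
  simp [h1]

-- the loop characterisation: from a mid-row state, A's loop appends exactly pvRest
theorem kthWordLoop_eq (L : List Int) (hL : L ≠ []) (m : Nat)
    (hmlt : m < L.length) (hmget : L[m] = L.getLast hL)
    (hmmin : ∀ j (hj : j < m), L[j]'(by omega) ≠ L.getLast hL) :
    ∀ fuel c R ans, c ≤ R → R ≤ m → (pvRest L m R c).length ≤ fuel →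
      kthWordLoop L fuel ans c (R + 1) = ans ++ pvRest L m R c := by
  intro fuel
  induction fuel with
  | zero =>
    intro c R ans hc hR hfuel
    have := pvRest_len_pos L m R c hc (by omega)
    omega
  | succ fuel ih =>
    intro c R ans hc hR hfuel
    have hclen : c < L.length := by omega
    have hget : PySem.List.pyGet? L ((c : Nat) : Int) = some (L[c]) :=
      PySem.List.pyGet?_ofNat L c hclen
    have hlast : PySem.List.pyGet? L (-1) = some (L.getLast hL) := by
      rw [PySem.List.pyGet?_neg_one, List.getLast?_eq_some_getLast hL]
    simp only [kthWordLoop, hget, PySem.List.pyGet?_neg_one_append_singleton, hlast]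
    by_cases hcm : c = m
    · -- break: the appended element is the last value
      have hRm : R = m := by omega
      subst hcm hRm
      rw [if_pos (by rw [hmget]), pvRest_last L R hmlt]
    · -- continue
      have hcmlt : c < m := by omega
      have hne : L[c] ≠ L.getLast hL := hmmin c hcmlt
      rw [if_neg (by simpa using hne)]
      by_cases hcr : c + 1 = R + 1
      · have hcR : c = R := by omega
        subst hcR
        rw [if_pos rfl]
        have hstep := pvRest_cons_eq L m c (by omega) hmlt
        have hlen1 : (pvRest L m (c + 1) 0).length + 1 = (pvRest L m c c).length := by
          rw [hstep]; simp
        have hrec := ih 0 (c + 1) (ans ++ [L[c]]) (by omega) (by omega) (by omega)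
        simp only [hrec, hstep]
        simp
      · have hclt : c < R := by omega
        rw [if_neg hcr]
        have hstep := pvRest_cons_lt L m R c hclt (by omega)
        have hlen1 : (pvRest L m R (c + 1)).length + 1 = (pvRest L m R c).length := by
          rw [hstep]; simp
        have hrec := ih (c + 1) R (ans ++ [L[c]]) (by omega) hR (by omega)
        simp only [hrec, hstep]
        simp

-- lengths of the row blocks
theorem pvFlat_len (L : List Int) :
    ∀ n a, a + n ≤ L.length →
      ((List.range' a n).flatMap (fun r => L.take (r + 1))).length = pvT (a + n) - pvT a := by
  intro n
  induction n with
  | zero => intro a ha; simp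
  | succ n ih =>
    intro a ha
    rw [List.range'_succ, List.flatMap_cons]
    have h1 := ih (a + 1) (by omega)
    have h2 : (L.take (a + 1)).length = a + 1 := by simp [List.length_take]; omega
    have h3 : pvT (a + 1) = pvT a + (a + 1) := rfl
    have h4 : pvT (a + 1) ≤ pvT (a + 1 + n) := pvT_mono (by omega)
    have h5 : a + 1 + n = a + (n + 1) := by omega
    simp only [List.length_append, h2, h1, ← h5]
    omega

-- pvRest at the initial state is the full triangular prefix stream
theorem pvRest00 (L : List Int) (m : Nat) (_hm : m < L.length) :
    pvRest L m 0 0 = (List.range' 0 (m + 1)).flatMap (fun r => L.take (r + 1)) := by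
  unfold pvRest
  rw [show m + 1 = 1 + m from by omega, ← List.range'_append_1]
  simp [List.range'_one]

theorem pvStream_len (L : List Int) (m : Nat) (hm : m < L.length) :
    ((List.range' 0 (m + 1)).flatMap (fun r => L.take (r + 1))).length = pvT (m + 1) := by
  have h := pvFlat_len L (m + 1) 0 (by omega)
  have h0 : pvT 0 = 0 := rfl
  have h01 : 0 + (m + 1) = m + 1 := by omega
  rw [h01, h0] at h
  omega

-- indexing the stream: position pvT r + c holds L[c]
theorem pvStream_get (L : List Int) :
    ∀ n r c, (hc : c ≤ r) → (hr : r < n) → (hn : n ≤ L.length) →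
      ((List.range' 0 n).flatMap (fun u => L.take (u + 1)))[pvT r + c]? =
        some (L[c]'(by omega)) := by
  intro n
  induction n with
  | zero => intro r c _ h _; omega
  | succ n ih =>
    intro r c hc hr hn
    rw [List.range'_concat]
    simp only [Nat.zero_add, Nat.one_mul, List.flatMap_append, List.flatMap_cons,
      List.flatMap_nil, List.append_nil]
    by_cases hrn : r < n
    · have hL : ((List.range' 0 n).flatMap (fun u => L.take (u + 1))).length = pvT n := by
        have h := pvFlat_len L n 0 (by omega)
        have h0 : pvT 0 = 0 := rfl
        have h01 : 0 + n = n := by omega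
        rw [h01, h0] at h
        omega
      have hidx : pvT r + c < pvT n := by
        have h1 : pvT (r + 1) = pvT r + (r + 1) := rfl
        have h2 := pvT_mono (show r + 1 ≤ n by omega)
        omega
      rw [List.getElem?_append_left (by omega)]
      exact ih r c hc hrn (by omega)
    · have hrn' : r = n := by omega
      subst hrn'
      have hL : ((List.range' 0 r).flatMap (fun u => L.take (u + 1))).length = pvT r := by
        have h := pvFlat_len L r 0 (by omega)
        have h0 : pvT 0 = 0 := rfl
        have h01 : 0 + r = r := by omega
        rw [h01, h0] at h
        omega
      rw [List.getElem?_append_right (by omega)]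
      have hsub : pvT r + c - ((List.range' 0 r).flatMap (fun u => L.take (u + 1))).length = c := by
        omega
      rw [hsub, List.getElem?_take, if_pos (by omega)]
      exact List.getElem?_eq_getElem (by omega)

-- B's row search returns the unique r with pvT r ≤ i < pvT (r+1)
theorem findRowB_spec (i : Int) :
    ∀ fuel r, ((pvT r : Nat) : Int) ≤ i → i.toNat + 1 ≤ fuel + r →
      ((pvT (findRowB i fuel r) : Nat) : Int) ≤ i ∧
        i < ((pvT (findRowB i fuel r + 1) : Nat) : Int) := by
  intro fuel
  induction fuel with
  | zero =>
    intro r hle hfuel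
    have h1 := pvT_le_self r
    omega
  | succ fuel ih =>
    intro r hle hfuel
    have hT : ((r + 1) * (r + 2) / 2 : Nat) = pvT (r + 1) := pvT_closed r
    simp only [findRowB]
    by_cases h : (((r + 1) * (r + 2) / 2 : Nat) : Int) ≤ i
    · rw [if_pos h]
      exact ih (r + 1) (by rw [hT] at h; exact h) (by omega)
    · rw [if_neg h]
      rw [hT] at h
      exact ⟨hle, by omega⟩

-- ===== VERDICT (by name: the statement is the Claim_ definition above) =====
theorem kthWord_spec : Claim_equal_kthWord := by
  intro L k _ hpre
  obtain ⟨hL, hk⟩ := hpre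
  set t := L.getLast hL with ht
  have hlast : PySem.List.pyGet? L (-1) = some t := by
    rw [PySem.List.pyGet?_neg_one, List.getLast?_eq_some_getLast hL]
  have htmem : t ∈ L := List.getLast_mem hL
  obtain ⟨m, hm⟩ : ∃ m, PySem.List.index? L t = some m :=
    Option.isSome_iff_exists.mp ((PySem.List.index?_isSome_iff L t).mpr htmem)
  obtain ⟨hmlt, hmget, hmmin⟩ := PySem.List.getElem_of_index?_eq_some hm
  have hNT : (m + 1) * (m + 2) / 2 = pvT (m + 1) := pvT_closed m
  -- unpack Pre_'s inequality with this m
  simp only [hlast, Option.getD_some, hm, hNT] at hk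
  -- evaluate A's loop
  have hfuel : (pvRest L m 0 0).length ≤ (L.length + 1) * (L.length + 2) / 2 + 1 := by
    rw [pvRest00 L m hmlt, pvStream_len L m hmlt]
    have h1 : pvT (m + 1) ≤ pvT (L.length + 1) := pvT_mono (by omega)
    have h2 := pvT_two (L.length + 1)
    have h3 : (L.length + 1) * (L.length + 1 + 1) = (L.length + 1) * (L.length + 2) := by ring
    omega
  have hloop := kthWordLoop_eq L hL m hmlt hmget hmmin
      ((L.length + 1) * (L.length + 2) / 2 + 1) 0 0 [] (le_refl 0) (by omega) hfuel
  rw [pvRest00 L m hmlt] at hloop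
  set S := (List.range' 0 (m + 1)).flatMap (fun u => L.take (u + 1)) with hS
  have hSlen : S.length = pvT (m + 1) := pvStream_len L m hmlt
  have hloop' : kthWordLoop L ((L.length + 1) * (L.length + 2) / 2 + 1) [] 0 1 = S := by
    simpa using hloop
  -- unfold both ports
  show kthWord L k = kthWord_alt L k
  simp only [kthWord, kthWord_alt, hlast, hm, hloop', hSlen, hNT]
  by_cases hcond : k = 0 ∨ ((pvT (m + 1) : Nat) : Int) < k
  · rw [if_pos hcond, if_pos hcond]
  · rw [if_neg hcond, if_neg hcond]
    rw [not_or] at hcond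
    obtain ⟨hk0, hkN⟩ := hcond
    set N : Int := ((pvT (m + 1) : Nat) : Int) with hN
    set i : Int := if 1 ≤ k then k - 1 else N + k - 1 with hi
    have hirange : 0 ≤ i ∧ i < N := by
      by_cases h1 : 1 ≤ k
      · simp only [hi, if_pos h1]; omega
      · simp only [hi, if_neg h1]; omega
    have hrow := findRowB_spec i (i.toNat + 1) 0 (by simpa using hirange.1) (by omega)
    set r := findRowB i (i.toNat + 1) 0 with hr
    obtain ⟨hr1, hr2⟩ := hrow
    have hrm : r ≤ m := by
      by_contra hcon
      have := pvT_mono (show m + 1 ≤ r by omega)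
      omega
    have hrT : pvT (r + 1) = pvT r + (r + 1) := rfl
    set c : Nat := i.toNat - pvT r with hc
    have hcr : c ≤ r := by omega
    have hic : i.toNat = pvT r + c := by omega
    have hclen : c < L.length := by omega
    -- A's answer
    have hA : PySem.List.pyGet? S (k - 1) = S[i.toNat]? := by
      by_cases h1 : 1 ≤ k
      · have hi' : i = k - 1 := by simp [hi, if_pos h1]
        rw [← hi', PySem.List.pyGet?_of_nonneg S hirange.1]
      · have hi' : i = N + k - 1 := by simp [hi, if_neg h1]
        have hks : k - 1 = -((((1 - k).toNat : Nat)) : Int) := by omega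
        rw [hks, PySem.List.pyGet?_neg_natCast S (1 - k).toNat (by omega) (by omega)]
        congr 1
        omega
    rw [hA, hic, pvStream_get L (m + 1) r c hcr (by omega) (by omega)]
    -- B's answer
    have hTr : r * (r + 1) / 2 = pvT r := pvT_eq r
    have hB : i - ((r * (r + 1) / 2 : Nat) : Int) = ((c : Nat) : Int) := by
      rw [hTr]; omega
    rw [hB, PySem.List.pyGet?_natCast, List.getElem?_eq_getElem hclen]
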